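-- pv_equiv track=rewrite | github.com/MartoBadi/lab_collatz_fractal_research | ataque_hiperagresivo_de_fuerza_bruta.py | check_family_membership
-- ===== SOURCE A (Python) =====
-- def check_family_membership(n, a_values, z_tolerance=20, max_j=30):
--     """
--     Verifica si n ∈ {a·4^j + 1 + z : a ∈ A, j ∈ ℕ, |z| ≤ z_tolerance}.
--     Retorna: (is_member, a, j, z) o (False, None, None, None)
--     """
--     for j in range(max_j):
--         power = 4**j
--         if power > n * 2:  # Optimización: salir si 4^j es demasiado grande
--             break
--
--         for a in a_values:
--             base = a * power + 1
--             diff = n - base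
--
--             if abs(diff) <= z_tolerance:
--                 return True, a, j, diff
--
--     return False, None, None, None
-- ===== SOURCE B (Python) =====
-- def check_family_membership(n, a_values, z_tolerance=20, max_j=30):
--     """Loop-interchanged re-implementation: one pass over a_values, computing for
--     each a its minimal feasible j, then keeping the lexicographically least
--     (j, position) result."""
--     def min_j(a):
--         power = 1
--         j = 0
--         while j < max_j and power <= n * 2:
--             diff = n - (a * power + 1)
--             if abs(diff) <= z_tolerance:
--                 return j, diff
--             power *= 4
--             j += 1
--         return None
--
--     best = None  # (j, a, diff); replaced only on strictly smaller j
--     for a in a_values: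
--         r = min_j(a)
--         if r is not None and (best is None or r[0] < best[0]):
--             best = (r[0], a, r[1])
--     if best is None:
--         return False, None, None, None
--     return True, best[1], best[0], best[2]
-- ===== Notes on version B (the rewrite author's own statement) =====
-- stated objective: alternative
-- what changed: B interchanges the loops: one pass over a_values computes for each a its minimal feasible j with an inner power loop, and the lexicographically least (j, position) candidate is kept, instead of A's j-major nested rescan of the whole list per exponent.
import Mathlib
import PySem

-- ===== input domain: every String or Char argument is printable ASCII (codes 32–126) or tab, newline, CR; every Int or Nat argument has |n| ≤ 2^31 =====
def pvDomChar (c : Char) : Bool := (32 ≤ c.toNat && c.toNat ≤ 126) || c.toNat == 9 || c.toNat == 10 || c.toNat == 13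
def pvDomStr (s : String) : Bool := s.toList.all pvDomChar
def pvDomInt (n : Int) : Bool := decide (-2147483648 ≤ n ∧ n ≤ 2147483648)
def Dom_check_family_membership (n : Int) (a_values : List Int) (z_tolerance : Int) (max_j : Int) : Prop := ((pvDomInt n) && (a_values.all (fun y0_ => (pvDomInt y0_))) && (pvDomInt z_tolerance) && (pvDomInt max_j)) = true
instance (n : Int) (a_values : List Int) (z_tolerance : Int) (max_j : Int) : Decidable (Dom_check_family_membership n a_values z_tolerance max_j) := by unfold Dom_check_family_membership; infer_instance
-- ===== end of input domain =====

-- B interchanges A's loops (one pass over a_values, per-a minimal j, lex-least (j, position) kept);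
-- same asymptotic cost, a genuinely different traversal ("alternative").

-- ===== PORT A =====
-- inner 'for a in a_values' loop: first a with |n - (a*power+1)| ≤ z, returning (a, diff)
def cfmInner (n power z : Int) : List Int → Option (Int × Int)
  | [] => none
  | a :: rest =>
      let base := a * power + 1
      let diff := n - base
      if |diff| ≤ z then some (a, diff) else cfmInner n power z rest

-- outer 'for j in range(max_j)' loop with the 'break' on power > n*2;
-- the counting loop is transcribed as fuel = number of remaining j's, j the current index
def cfmOuter (n z : Int) (avs : List Int) : Nat → Int → Bool × Option Int × Option Int × Option Int
  | 0, _ => (false, none, none, none)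
  | fuel + 1, j =>
      let power : Int := (4 : Int) ^ j.toNat   -- 4**j; j ranges over range(max_j), so j ≥ 0
      if power > n * 2 then (false, none, none, none)
      else
        match cfmInner n power z avs with
        | some (a, diff) => (true, some a, some j, some diff)
        | none => cfmOuter n z avs fuel (j + 1)

def check_family_membership (n : Int) (a_values : List Int) (z_tolerance : Int) (max_j : Int) : Bool × Option Int × Option Int × Option Int :=
  cfmOuter n z_tolerance a_values max_j.toNat 0

-- ===== PORT B =====
-- Source B's 'while j < max_j and power <= n*2' loop; fuel = number of remaining j's (max_j - j)
def minJAux (n z a : Int) : Nat → Int → Int → Option (Int × Int)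
  | 0, _, _ => none
  | fuel + 1, j, power =>
      if power ≤ n * 2 then
        let diff := n - (a * power + 1)
        if |diff| ≤ z then some (j, diff)
        else minJAux n z a fuel (j + 1) (power * 4)
      else none

-- Source B's min_j(a)
def minJ (n z max_j a : Int) : Option (Int × Int) := minJAux n z a max_j.toNat 0 1

-- Source B's 'for a in a_values' accumulation of best = (j, a, diff), replaced only on strictly smaller j
-- one update of best by the candidate r = min_j(a) (replace only on strictly smaller j)
def bStep (a : Int) (r : Option (Int × Int)) (best : Option (Int × Int × Int)) : Option (Int × Int × Int) :=
  match r, best with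
  | some (j, diff), none => some (j, a, diff)
  | some (j, diff), some (bj, ba, bd) => if j < bj then some (j, a, diff) else some (bj, ba, bd)
  | none, b => b

def bFold (g : Int → Option (Int × Int)) : List Int → Option (Int × Int × Int) → Option (Int × Int × Int)
  | [], best => best
  | a :: rest, best => bFold g rest (bStep a (g a) best)

def check_family_membership_alt (n : Int) (a_values : List Int) (z_tolerance : Int) (max_j : Int) : Bool × Option Int × Option Int × Option Int :=
  match bFold (minJ n z_tolerance max_j) a_values none with
  | none => (false, none, none, none)
  | some (j, a, diff) => (true, some a, some j, some diff)

-- ===== PRECONDITION & SPEC =====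
def Spec_check_family_membership (n : Int) (a_values : List Int) (z_tolerance : Int) (max_j : Int) (out : Bool × Option Int × Option Int × Option Int) : Prop := out = check_family_membership_alt n a_values z_tolerance max_j
instance (n : Int) (a_values : List Int) (z_tolerance : Int) (max_j : Int) (out : Bool × Option Int × Option Int × Option Int) : Decidable (Spec_check_family_membership n a_values z_tolerance max_j out) := by unfold Spec_check_family_membership; infer_instance

-- ===== CLAIM (what is proved, stated in full; the proofs are below) =====
def Claim_equal_check_family_membership : Prop := ∀ (n : Int) (a_values : List Int) (z_tolerance : Int) (max_j : Int), Dom_check_family_membership n a_values z_tolerance max_j → Spec_check_family_membership n a_values z_tolerance max_j (check_family_membership n a_values z_tolerance max_j)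

-- ===== LEMMAS AND PROOFS =====

-- any j returned by minJAux starting at j0 satisfies j0 ≤ j
theorem minJAux_ge (n z a : Int) :
    ∀ (f : Nat) (j0 p : Int) (j d : Int), minJAux n z a f j0 p = some (j, d) → j0 ≤ j := by
  intro f
  induction f with
  | zero => intro j0 p j d h; simp [minJAux] at h
  | succ f ih =>
      intro j0 p j d h
      simp only [minJAux] at h
      split_ifs at h with h1 h2
      · simp only [Option.some.injEq, Prod.mk.injEq] at h
        omega
      · have := ih (j0 + 1) (p * 4) j d h
        omega

-- if power already exceeds n*2, minJAux returns none regardless of fuel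
theorem minJAux_dead (n z a : Int) (f : Nat) (j0 p : Int) (h : ¬ p ≤ n * 2) :
    minJAux n z a f j0 p = none := by
  cases f with
  | zero => rfl
  | succ f => simp [minJAux, h]

-- fold keeps a best whose j never gets beaten
theorem bFold_keep (g : Int → Option (Int × Int)) (j0 a0 d0 : Int) :
    ∀ (l : List Int), (∀ a ∈ l, ∀ j d, g a = some (j, d) → j0 ≤ j) →
      bFold g l (some (j0, a0, d0)) = some (j0, a0, d0) := by
  intro l
  induction l with
  | nil => intro _; rfl
  | cons a rest ih =>
      intro hl
      simp only [bFold]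
      have hstep : bStep a (g a) (some (j0, a0, d0)) = some (j0, a0, d0) := by
        cases hg : g a with
        | none => rfl
        | some jd =>
            obtain ⟨j, d⟩ := jd
            have hge : j0 ≤ j := hl a (List.mem_cons_self ..) j d hg
            simp [bStep, show ¬ j < j0 by omega]
      rw [hstep]
      exact ih (fun a ha => hl a (List.mem_cons_of_mem _ ha))

-- fold over a list of all-none candidates leaves best unchanged
theorem bFold_none (g : Int → Option (Int × Int)) :
    ∀ (l : List Int) (best : Option (Int × Int × Int)), (∀ a ∈ l, g a = none) →
      bFold g l best = best := by
  intro l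
  induction l with
  | nil => intro best _; rfl
  | cons a rest ih =>
      intro best hl
      simp only [bFold, hl a (List.mem_cons_self ..), bStep]
      exact ih best (fun a ha => hl a (List.mem_cons_of_mem _ ha))

-- predicate describing an acceptable accumulator before the first j0-match is folded in
def BestAbove (j0 : Int) : Option (Int × Int × Int) → Prop
  | none => True
  | some (bj, _, _) => j0 < bj

-- bStep by a candidate strictly above j0 preserves BestAbove
theorem bestAbove_bStep (j0 a : Int) (r : Option (Int × Int)) (best : Option (Int × Int × Int))
    (hb : BestAbove j0 best) (hr : ∀ j d, r = some (j, d) → j0 + 1 ≤ j) :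
    BestAbove j0 (bStep a r best) := by
  cases r with
  | none => exact hb
  | some jd =>
      obtain ⟨j, d⟩ := jd
      have hj : j0 + 1 ≤ j := hr j d rfl
      cases best with
      | none => simpa [bStep, BestAbove] using (by omega : j0 < j)
      | some t =>
          obtain ⟨bj, ba, bd⟩ := t
          have hbj : j0 < bj := hb
          by_cases hlt : j < bj
          · simpa [bStep, BestAbove, hlt] using (by omega : j0 < j)
          · simpa [bStep, BestAbove, hlt] using hbj

-- core per-j lemma: relate A's inner scan at exponent j0 (power p) to B's fold with fuel f+1
theorem inner_fold_main (n z : Int) (f : Nat) (j0 p : Int) (hp : p ≤ n * 2) :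
    ∀ (l : List Int) (best : Option (Int × Int × Int)), BestAbove j0 best →
      (match cfmInner n p z l with
       | some (a, d) => bFold (fun b => minJAux n z b (f + 1) j0 p) l best = some (j0, a, d)
       | none => bFold (fun b => minJAux n z b (f + 1) j0 p) l best
                 = bFold (fun b => minJAux n z b f (j0 + 1) (p * 4)) l best) := by
  intro l
  induction l with
  | nil => intro best _; simp [cfmInner, bFold]
  | cons a rest ih =>
      intro best hb
      by_cases hP : |n - (a * p + 1)| ≤ z
      · -- head matches at j0
        simp only [cfmInner, hP, if_true]
        simp only [bFold]
        have hg : minJAux n z a (f + 1) j0 p = some (j0, n - (a * p + 1)) := by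
          simp [minJAux, hp, hP]
        rw [hg]
        have hrest : ∀ b ∈ rest, ∀ j d, (fun b => minJAux n z b (f + 1) j0 p) b = some (j, d) → j0 ≤ j :=
          fun b _ j d h => minJAux_ge n z b (f + 1) j0 p j d h
        have hstep : bStep a (some (j0, n - (a * p + 1))) best = some (j0, a, n - (a * p + 1)) := by
          cases best with
          | none => rfl
          | some t =>
              obtain ⟨bj, ba, bd⟩ := t
              have : j0 < bj := hb
              simp [bStep, this]
        rw [hstep]
        exact bFold_keep _ _ _ _ rest hrest
      · -- head does not match at j0: its candidate shifts to start (j0+1, p*4)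
        have hg : minJAux n z a (f + 1) j0 p = minJAux n z a f (j0 + 1) (p * 4) := by
          simp [minJAux, hp, hP]
        simp only [cfmInner, hP, if_false, bFold, hg]
        have hb' : BestAbove j0 (bStep a (minJAux n z a f (j0 + 1) (p * 4)) best) :=
          bestAbove_bStep j0 a _ best hb
            (fun j d h => minJAux_ge n z a f (j0 + 1) (p * 4) j d h)
        exact ih (bStep a (minJAux n z a f (j0 + 1) (p * 4)) best) hb'

-- main induction: A's j-major scan from j0 with fuel f equals the rendered B-fold
theorem main_lemma (n z : Int) (avs : List Int) :
    ∀ (f : Nat) (j0 : Int), 0 ≤ j0 →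
      cfmOuter n z avs f j0
        = (match bFold (fun a => minJAux n z a f j0 ((4 : Int) ^ j0.toNat)) avs none with
           | none => (false, none, none, none)
           | some (j, a, diff) => (true, some a, some j, some diff)) := by
  intro f
  induction f with
  | zero =>
      intro j0 _
      have h0 : bFold (fun a => minJAux n z a 0 j0 ((4 : Int) ^ j0.toNat)) avs none = none :=
        bFold_none _ avs none (fun a _ => rfl)
      rw [h0]
      rfl
  | succ f ih =>
      intro j0 hj0
      show (if (4 : Int) ^ j0.toNat > n * 2 then (false, none, none, none)
            else match cfmInner n ((4 : Int) ^ j0.toNat) z avs with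
              | some (a, diff) => (true, some a, some j0, some diff)
              | none => cfmOuter n z avs f (j0 + 1)) = _
      by_cases hp : (4 : Int) ^ j0.toNat > n * 2
      · have hdead : bFold (fun a => minJAux n z a (f + 1) j0 ((4 : Int) ^ j0.toNat)) avs none = none :=
          bFold_none _ avs none (fun a _ => minJAux_dead n z a (f + 1) j0 _ (by omega))
        rw [hdead]
        simp [hp]
      · have hple : (4 : Int) ^ j0.toNat ≤ n * 2 := by omega
        have hcore := inner_fold_main n z f j0 ((4 : Int) ^ j0.toNat) hple avs none trivial
        simp only [hp, if_false]
        cases hInn : cfmInner n ((4 : Int) ^ j0.toNat) z avs with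
        | some t =>
            obtain ⟨a, d⟩ := t
            rw [hInn] at hcore
            rw [hcore]
        | none =>
            rw [hInn] at hcore
            rw [hcore]
            have hpow : (4 : Int) ^ j0.toNat * 4 = (4 : Int) ^ (j0 + 1).toNat := by
              have h1 : (j0 + 1).toNat = j0.toNat + 1 := by omega
              rw [h1, pow_succ]
            rw [hpow]
            exact ih (j0 + 1) (by omega)

-- ===== VERDICT (by name: the statement is the Claim_ definition above) =====
theorem check_family_membership_spec : Claim_equal_check_family_membership := by
  intro n avs z mj _
  unfold Spec_check_family_membership check_family_membership check_family_membership_alt minJ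
  exact main_lemma n z avs mj.toNat 0 le_rfl
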